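-- pv_equiv track=rewrite | github.com/myfirstaccoun/my-python-projects | معادلات هامة.py | onSide
-- ===== SOURCE A (Python) =====
-- def onSide(arr, item, greater = 1, startFrom = 0): # 2D arr=[1,1,1,3,2,2,2,1,2,2], item=2, greater=1 ==> [ [4,5,6], [8,9] ] ==> [ indexArr ]
-- 	finalArr = []
-- 	onceArr = []
--
-- 	i = startFrom
-- 	while i < len(arr):
-- 		if arr[i] == item:
-- 			onceArr.append(i)
-- 		else:
-- 			if len(onceArr) > greater:
-- 				finalArr.append(onceArr)
--
-- 			onceArr = []
-- 		i += 1
--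
-- 	if len(onceArr) > greater:
-- 		finalArr.append(onceArr)
-- 		onceArr = []
--
-- 	return finalArr
-- ===== SOURCE B (Python) =====
-- def onSide(arr, item, greater=1, startFrom=0):
--     n = len(arr)
--     cuts = [i for i in range(startFrom, n) if arr[i] != item] + [n]
--     out = []
--     lo = startFrom
--     for c in cuts:
--         run = list(range(lo, c))
--         if len(run) > greater:
--             out.append(run)
--         lo = c + 1
--     return out
-- ===== Notes on version B (the rewrite author's own statement) =====
-- stated objective: alternative
-- what changed: B replaces A's single-pass element accumulator (onceArr grown/flushed inside a while loop) by a staged pipeline: first collect the mismatch positions (cuts) with a sentinel at len(arr), then emit each run as the range between consecutive cuts, filtered by length.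
import Mathlib
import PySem

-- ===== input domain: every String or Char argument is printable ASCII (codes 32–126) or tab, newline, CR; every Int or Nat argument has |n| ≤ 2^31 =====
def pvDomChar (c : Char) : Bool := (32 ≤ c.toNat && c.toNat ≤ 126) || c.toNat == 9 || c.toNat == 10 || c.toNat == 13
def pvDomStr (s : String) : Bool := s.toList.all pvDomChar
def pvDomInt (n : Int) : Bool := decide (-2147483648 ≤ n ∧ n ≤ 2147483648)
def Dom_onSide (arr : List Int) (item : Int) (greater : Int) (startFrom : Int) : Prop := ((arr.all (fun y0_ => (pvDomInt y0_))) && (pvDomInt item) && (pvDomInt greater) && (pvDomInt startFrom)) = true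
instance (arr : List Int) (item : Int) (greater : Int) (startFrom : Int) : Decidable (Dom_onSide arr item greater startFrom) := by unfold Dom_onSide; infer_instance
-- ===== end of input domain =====

-- B replaces A's single-pass run accumulator by a staged pipeline (collect mismatch cuts, then emit
-- each run as the range between consecutive cuts); alternative decomposition, same cost.

-- ===== PORT A =====
-- A's while loop: state (i, finalArr, onceArr); arr[i] is pyGet? (negative i wraps).
-- Outside Pre_ (i out of range) pyGet? is none; the `.getD (item - 1)` default is never hit inside Pre_.
def onSideLoopA (arr : List Int) (item : Int) (greater : Int) (i : Int)
    (finalArr : List (List Int)) (onceArr : List Int) : List (List Int) :=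
  if _h : i < (arr.length : Int) then
    if (PySem.List.pyGet? arr i).getD (item - 1) = item then
      onSideLoopA arr item greater (i + 1) finalArr (onceArr ++ [i])
    else
      if (onceArr.length : Int) > greater then
        onSideLoopA arr item greater (i + 1) (finalArr ++ [onceArr]) []
      else
        onSideLoopA arr item greater (i + 1) finalArr []
  else
    if (onceArr.length : Int) > greater then finalArr ++ [onceArr] else finalArr
termination_by ((arr.length : Int) - i).toNat
decreasing_by all_goals omega

def onSide (arr : List Int) (item : Int) (greater : Int) (startFrom : Int) : List (List Int) :=
  onSideLoopA arr item greater startFrom [] []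

-- ===== PORT B =====
-- Source B: cuts = mismatch positions plus sentinel n; then a fold over cuts with state (lo, out),
-- each run materialised as list(range(lo, c)).
def onSide_alt (arr : List Int) (item : Int) (greater : Int) (startFrom : Int) : List (List Int) :=
  let n : Int := (arr.length : Int)
  let cuts : List Int :=
    ((PySem.List.pyRange startFrom n 1).filter
        (fun i => !(PySem.List.pyGet? arr i == some item))) ++ [n]
  (cuts.foldl
      (fun (st : Int × List (List Int)) c =>
        let run := PySem.List.pyRange st.1 c 1
        (c + 1, if (run.length : Int) > greater then st.2 ++ [run] else st.2))
      (startFrom, ([] : List (List Int)))).2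

-- ===== PRECONDITION & SPEC =====
-- A raises IndexError exactly when startFrom < len(arr) and startFrom < -len(arr); Pre_ excludes only those (B raises there too).
def Pre_onSide (arr : List Int) (item : Int) (greater : Int) (startFrom : Int) : Prop :=
  -(arr.length : Int) ≤ startFrom ∨ (arr.length : Int) ≤ startFrom
instance (arr : List Int) (item : Int) (greater : Int) (startFrom : Int) : Decidable (Pre_onSide arr item greater startFrom) := by unfold Pre_onSide; infer_instance
def pvWitness_onSide : List Int × Int × Int × Int := ([1, 1, 1, 3, 2, 2, 2, 1, 2, 2], 2, 1, 0)

def Spec_onSide (arr : List Int) (item : Int) (greater : Int) (startFrom : Int) (out : List (List Int)) : Prop := out = onSide_alt arr item greater startFrom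
instance (arr : List Int) (item : Int) (greater : Int) (startFrom : Int) (out : List (List Int)) : Decidable (Spec_onSide arr item greater startFrom out) := by unfold Spec_onSide; infer_instance

-- ===== CLAIM (what is proved, stated in full; the proofs are below) =====
def Claim_equal_onSide : Prop := ∀ (arr : List Int) (item : Int) (greater : Int) (startFrom : Int), Dom_onSide arr item greater startFrom → Pre_onSide arr item greater startFrom → Spec_onSide arr item greater startFrom (onSide arr item greater startFrom)

-- ===== LEMMAS AND PROOFS =====

-- Invariant: A's accumulator onceArr is exactly pyRange lo i 1 where lo is B's next run start;
-- A's loop from i equals B's fold over the remaining cuts (mismatches in [i, n) plus the sentinel n).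
theorem onSideLoop_eq (arr : List Int) (item : Int) (greater : Int) :
    ∀ (k : Nat) (i lo : Int) (F : List (List Int)),
      ((arr.length : Int) - i).toNat ≤ k →
      (-(arr.length : Int) ≤ i ∨ (arr.length : Int) ≤ i) →
      lo ≤ i →
      (i ≤ (arr.length : Int) ∨ lo = i) →
      onSideLoopA arr item greater i F (PySem.List.pyRange lo i 1)
        = ((((PySem.List.pyRange i (arr.length : Int) 1).filter
              (fun j => !(PySem.List.pyGet? arr j == some item))) ++ [(arr.length : Int)]).foldl
            (fun (st : Int × List (List Int)) c =>
              let run := PySem.List.pyRange st.1 c 1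
              (c + 1, if (run.length : Int) > greater then st.2 ++ [run] else st.2))
            (lo, F)).2 := by
  intro k
  induction k with
  | zero =>
    intro i lo F hk h1 h2 h3
    have hni : ¬ i < (arr.length : Int) := by omega
    rw [onSideLoopA, dif_neg hni,
        PySem.List.pyRange_one_eq_nil (by omega : (arr.length : Int) ≤ i)]
    simp only [List.filter_nil, List.nil_append, List.foldl_cons, List.foldl_nil]
    have : PySem.List.pyRange lo i 1 = PySem.List.pyRange lo (arr.length : Int) 1 := by
      rcases h3 with h | h
      · have : i = (arr.length : Int) := by omega
        rw [this]
      · rw [PySem.List.pyRange_one_eq_nil (by omega), PySem.List.pyRange_one_eq_nil (by omega)]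
    rw [this]
  | succ k ih =>
    intro i lo F hk h1 h2 h3
    by_cases hi : i < (arr.length : Int)
    · have hrange : PySem.Raise.InRange arr.length i := ⟨by omega, by omega⟩
      obtain ⟨v, hv⟩ : ∃ v, PySem.List.pyGet? arr i = some v := by
        rcases Option.eq_none_or_eq_some (PySem.List.pyGet? arr i) with h | h
        · exact absurd hrange ((PySem.List.pyGet?_eq_none_iff arr i).mp h)
        · exact h
      rw [onSideLoopA, dif_pos hi, hv,
          PySem.List.pyRange_one_cons hi, List.filter_cons, hv]
      simp only [Option.getD_some]
      by_cases hvi : v = item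
      · rw [if_pos hvi]
        simp only [hvi, beq_self_eq_true, Bool.not_true, Bool.false_eq_true, if_false]
        rw [(PySem.List.pyRange_one_succ_right h2).symm]
        exact ih (i + 1) lo F (by omega) (by omega) (by omega) (by omega)
      · rw [if_neg hvi]
        have hbeq : (!(some v == some item)) = true := by
          simp [hvi]
        rw [if_pos hbeq, List.cons_append, List.foldl_cons]
        have hrec := ih (i + 1) (i + 1) (if ((PySem.List.pyRange lo i 1).length : Int) > greater
            then F ++ [PySem.List.pyRange lo i 1] else F) (by omega) (by omega) (le_refl _) (by omega)
        rw [PySem.List.pyRange_one_eq_nil (le_refl (i + 1))] at hrec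
        split_ifs with hc
        · rw [if_pos hc] at hrec; exact hrec
        · rw [if_neg hc] at hrec; exact hrec
    · exact ih i lo F (by omega) h1 h2 h3

-- ===== VERDICT (by name: the statement is the Claim_ definition above) =====
theorem onSide_spec : Claim_equal_onSide := by
  intro arr item greater startFrom _hdom hpre
  unfold Spec_onSide onSide onSide_alt
  have h := onSideLoop_eq arr item greater ((arr.length : Int) - startFrom).toNat
    startFrom startFrom [] (le_refl _) hpre (le_refl _) (by rcases hpre with h | h <;> omega)
  rw [PySem.List.pyRange_one_eq_nil (le_refl startFrom)] at h
  exact h
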